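-- pv_equiv track=rewrite | github.com/rubennoriegamier/aoc_2016 | day_02.py | part_1
-- ===== SOURCE A (Python) =====
-- def part_1(instructions):
--     buttons = []
--     y = 1
--     x = 1
--
--     for button_instructions in instructions:
--         for instruction in button_instructions:
--             match instruction:
--                 case 'D':
--                     y = min(2, y + 1)
--                 case 'R':
--                     x = min(2, x + 1)
--                 case 'U':
--                     y = max(0, y - 1)
--                 case 'L':
--                     x = max(0, x - 1)
--
--         buttons.append(str(y * 3 + x + 1))
--
--     return int(''.join(buttons))
-- ===== SOURCE B (Python) =====
-- # Table-driven keypad walk: a precomputed (button, move) -> button dict over the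
-- # grid '123'/'456'/'789' replaces A's clamped (y, x) coordinate arithmetic.
-- _TRANS = {
--     ('1', 'U'): '1', ('1', 'D'): '4', ('1', 'L'): '1', ('1', 'R'): '2',
--     ('2', 'U'): '2', ('2', 'D'): '5', ('2', 'L'): '1', ('2', 'R'): '3',
--     ('3', 'U'): '3', ('3', 'D'): '6', ('3', 'L'): '2', ('3', 'R'): '3',
--     ('4', 'U'): '1', ('4', 'D'): '7', ('4', 'L'): '4', ('4', 'R'): '5',
--     ('5', 'U'): '2', ('5', 'D'): '8', ('5', 'L'): '4', ('5', 'R'): '6',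
--     ('6', 'U'): '3', ('6', 'D'): '9', ('6', 'L'): '5', ('6', 'R'): '6',
--     ('7', 'U'): '4', ('7', 'D'): '7', ('7', 'L'): '7', ('7', 'R'): '8',
--     ('8', 'U'): '5', ('8', 'D'): '8', ('8', 'L'): '7', ('8', 'R'): '9',
--     ('9', 'U'): '6', ('9', 'D'): '9', ('9', 'L'): '8', ('9', 'R'): '9',
-- }
--
--
-- def part_1(instructions):
--     cur = '5'
--     buttons = []
--     for line in instructions:
--         for instr in line:
--             cur = _TRANS.get((cur, instr), cur)
--         buttons.append(cur)
--     return int(''.join(buttons))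
-- ===== Notes on version B (the rewrite author's own statement) =====
-- stated objective: idiomatic
-- what changed: B replaces A's clamped (y, x) coordinate arithmetic with a precomputed (button, move) -> button transition dictionary over the keypad characters, folding instructions to a current button character.
import Mathlib
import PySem

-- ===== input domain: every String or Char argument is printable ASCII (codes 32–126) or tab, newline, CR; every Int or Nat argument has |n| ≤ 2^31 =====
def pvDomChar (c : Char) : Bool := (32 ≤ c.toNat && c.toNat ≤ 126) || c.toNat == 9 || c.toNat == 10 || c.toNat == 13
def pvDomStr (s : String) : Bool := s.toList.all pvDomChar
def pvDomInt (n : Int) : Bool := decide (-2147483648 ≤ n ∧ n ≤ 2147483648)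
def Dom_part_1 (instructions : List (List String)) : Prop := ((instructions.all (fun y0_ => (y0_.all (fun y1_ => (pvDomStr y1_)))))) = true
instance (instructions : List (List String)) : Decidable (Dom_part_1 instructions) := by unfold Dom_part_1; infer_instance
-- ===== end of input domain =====

-- B replaces A's coordinate arithmetic by a precomputed character transition table; same cost, proved equal on non-empty input (return value only).

-- ===== PORT A =====
-- one instruction of A's inner match on (y, x)
def pvStepA (p : Int × Int) (instr : String) : Int × Int :=
  if instr = "D" then (min 2 (p.1 + 1), p.2)
  else if instr = "R" then (p.1, min 2 (p.2 + 1))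
  else if instr = "U" then (max 0 (p.1 - 1), p.2)
  else if instr = "L" then (p.1, max 0 (p.2 - 1))
  else p

def part_1 (instructions : List (List String)) : Int :=
  let st := instructions.foldl
    (fun (st : List String × Int × Int) line =>
      let yx := line.foldl pvStepA (st.2.1, st.2.2)
      (st.1 ++ [PySem.Int.toStr (yx.1 * 3 + yx.2 + 1)], yx.1, yx.2))
    ([], 1, 1)
  -- int(''.join(buttons)); ofStr? = none only for '' (ValueError), excluded by Pre_part_1
  (PySem.Int.ofStr? (PySem.Str.join "" st.1)).getD 0

-- ===== PORT B =====
def pvTrans : PySem.Dict (String × String) String := PySem.Dict.mk [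
  (("1", "U"), "1"), (("1", "D"), "4"), (("1", "L"), "1"), (("1", "R"), "2"),
  (("2", "U"), "2"), (("2", "D"), "5"), (("2", "L"), "1"), (("2", "R"), "3"),
  (("3", "U"), "3"), (("3", "D"), "6"), (("3", "L"), "2"), (("3", "R"), "3"),
  (("4", "U"), "1"), (("4", "D"), "7"), (("4", "L"), "4"), (("4", "R"), "5"),
  (("5", "U"), "2"), (("5", "D"), "8"), (("5", "L"), "4"), (("5", "R"), "6"),
  (("6", "U"), "3"), (("6", "D"), "9"), (("6", "L"), "5"), (("6", "R"), "6"),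
  (("7", "U"), "4"), (("7", "D"), "7"), (("7", "L"), "7"), (("7", "R"), "8"),
  (("8", "U"), "5"), (("8", "D"), "8"), (("8", "L"), "7"), (("8", "R"), "9"),
  (("9", "U"), "6"), (("9", "D"), "9"), (("9", "L"), "8"), (("9", "R"), "9")]

-- _TRANS.get((cur, instr), cur)
def pvStepB (cur : String) (instr : String) : String :=
  PySem.Dict.getD pvTrans (cur, instr) cur

def part_1_alt (instructions : List (List String)) : Int :=
  let st := instructions.foldl
    (fun (st : String × List String) line =>
      let cur := line.foldl pvStepB st.1
      (cur, st.2 ++ [cur]))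
    ("5", [])
  -- int(''.join(buttons)); ofStr? = none only for '' (ValueError), excluded by Pre_part_1
  (PySem.Int.ofStr? (PySem.Str.join "" st.2)).getD 0

-- ===== PRECONDITION & SPEC =====
-- Pre_ excludes only the empty instruction list, on which both Pythons raise ValueError from int('').
def Pre_part_1 (instructions : List (List String)) : Prop := instructions ≠ []
instance (instructions : List (List String)) : Decidable (Pre_part_1 instructions) := by unfold Pre_part_1; infer_instance
def pvWitness_part_1 : List (List String) := [["U", "U", "L"], ["D", "R"]]

def Spec_part_1 (instructions : List (List String)) (out : Int) : Prop := out = part_1_alt instructions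
instance (instructions : List (List String)) (out : Int) : Decidable (Spec_part_1 instructions out) := by unfold Spec_part_1; infer_instance

-- ===== CLAIM (what is proved, stated in full; the proofs are below) =====
def Claim_equal_part_1 : Prop := ∀ (instructions : List (List String)), Dom_part_1 instructions → Pre_part_1 instructions → Spec_part_1 instructions (part_1 instructions)

-- ===== LEMMAS AND PROOFS =====

def pvBounds (p : Int × Int) : Prop := 0 ≤ p.1 ∧ p.1 ≤ 2 ∧ 0 ≤ p.2 ∧ p.2 ≤ 2

lemma pvStepA_bounds (p : Int × Int) (s : String) (h : pvBounds p) : pvBounds (pvStepA p s) := by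
  obtain ⟨h1, h2, h3, h4⟩ := h
  unfold pvStepA pvBounds
  split_ifs <;> refine ⟨?_, ?_, ?_, ?_⟩ <;> dsimp only <;> omega

lemma pvStep_eq (y x : Int) (h : pvBounds (y, x)) (s : String) :
    pvStepB (PySem.Int.toStr (y * 3 + x + 1)) s
      = PySem.Int.toStr ((pvStepA (y, x) s).1 * 3 + (pvStepA (y, x) s).2 + 1) := by
  obtain ⟨h1, h2, h3, h4⟩ := h
  simp only at h1 h2 h3 h4
  by_cases hD : s = "D"
  · subst hD; interval_cases y <;> interval_cases x <;> decide
  by_cases hR : s = "R"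
  · subst hR; interval_cases y <;> interval_cases x <;> decide
  by_cases hU : s = "U"
  · subst hU; interval_cases y <;> interval_cases x <;> decide
  by_cases hL : s = "L"
  · subst hL; interval_cases y <;> interval_cases x <;> decide
  interval_cases y <;> interval_cases x <;>
    simp [pvStepB, pvStepA, pvTrans, PySem.Dict.getD, PySem.Dict.get?,
      hD, hR, hU, hL, Ne.symm hD, Ne.symm hR, Ne.symm hU, Ne.symm hL]

lemma pvLine_eq (line : List String) (y x : Int) (h : pvBounds (y, x)) :
    line.foldl pvStepB (PySem.Int.toStr (y * 3 + x + 1))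
      = PySem.Int.toStr ((line.foldl pvStepA (y, x)).1 * 3 + (line.foldl pvStepA (y, x)).2 + 1)
    ∧ pvBounds (line.foldl pvStepA (y, x)) := by
  induction line generalizing y x with
  | nil => exact ⟨rfl, h⟩
  | cons s rest ih =>
    have hb := pvStepA_bounds (y, x) s h
    simp only [List.foldl_cons, pvStep_eq y x h s]
    exact ih (pvStepA (y, x) s).1 (pvStepA (y, x) s).2 hb

lemma pvOuter_eq (instrs : List (List String)) :
    ∀ (y x : Int) (buf : List String), pvBounds (y, x) →
      instrs.foldl
        (fun (st : String × List String) line =>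
          let cur := line.foldl pvStepB st.1
          (cur, st.2 ++ [cur]))
        (PySem.Int.toStr (y * 3 + x + 1), buf)
      = (let r := instrs.foldl
            (fun (st : List String × Int × Int) line =>
              let yx := line.foldl pvStepA (st.2.1, st.2.2)
              (st.1 ++ [PySem.Int.toStr (yx.1 * 3 + yx.2 + 1)], yx.1, yx.2))
            (buf, y, x)
         (PySem.Int.toStr (r.2.1 * 3 + r.2.2 + 1), r.1)) := by
  induction instrs with
  | nil => intro y x buf h; rfl
  | cons line rest ih =>
    intro y x buf h
    obtain ⟨hline, hb⟩ := pvLine_eq line y x h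
    simp only [List.foldl_cons, hline]
    exact ih (line.foldl pvStepA (y, x)).1 (line.foldl pvStepA (y, x)).2
      (buf ++ [PySem.Int.toStr ((line.foldl pvStepA (y, x)).1 * 3 + (line.foldl pvStepA (y, x)).2 + 1)]) hb

-- ===== VERDICT (by name: the statement is the Claim_ definition above) =====
theorem part_1_spec : Claim_equal_part_1 := by
  intro instructions _ _
  unfold Spec_part_1 part_1 part_1_alt
  have h := pvOuter_eq instructions 1 1 [] (by unfold pvBounds; norm_num)
  have h5 : PySem.Int.toStr (1 * 3 + 1 + 1) = "5" := by decide
  rw [h5] at h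
  rw [h]
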